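-- pv_equiv track=rewrite | github.com/Enoch-H-Kang/adBO | hover/hover_program.py | _format_passages
-- ===== SOURCE A (Python) =====
-- from typing import List, Dict, Tuple
--
-- def _format_passages(passages: List[str], max_chars: int = 14000) -> str:
--     """
--     Soft cap to avoid blowing past the paper's 16,384 token context window.
--     (This is not a 'reasoning cap'; it's input-budget hygiene.)
--     """
--     out = []
--     total = 0
--     for i, p in enumerate(passages, 1):
--         chunk = f"[{i}] {p}"
--         if total + len(chunk) > max_chars:
--             break
--         out.append(chunk)
--         total += len(chunk)
--     return "\n".join(out)
-- ===== SOURCE B (Python) =====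
-- from typing import List
-- from itertools import accumulate, takewhile
--
-- def _format_passages(passages: List[str], max_chars: int = 14000) -> str:
--     chunks = [f"[{i}] {p}" for i, p in enumerate(passages, 1)]
--     sums = list(accumulate(map(len, chunks)))
--     k = sum(1 for _ in takewhile(lambda s: s <= max_chars, sums))
--     return "\n".join(chunks[:k])
-- ===== Notes on version B (the rewrite author's own statement) =====
-- stated objective: alternative
-- what changed: Replaced the single-pass running-total loop with break by a build-table-then-cutoff decomposition: build all formatted chunks, take prefix sums of their lengths with itertools.accumulate, count with takewhile how many cumulative sums fit the budget, and join that prefix.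
import Mathlib
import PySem

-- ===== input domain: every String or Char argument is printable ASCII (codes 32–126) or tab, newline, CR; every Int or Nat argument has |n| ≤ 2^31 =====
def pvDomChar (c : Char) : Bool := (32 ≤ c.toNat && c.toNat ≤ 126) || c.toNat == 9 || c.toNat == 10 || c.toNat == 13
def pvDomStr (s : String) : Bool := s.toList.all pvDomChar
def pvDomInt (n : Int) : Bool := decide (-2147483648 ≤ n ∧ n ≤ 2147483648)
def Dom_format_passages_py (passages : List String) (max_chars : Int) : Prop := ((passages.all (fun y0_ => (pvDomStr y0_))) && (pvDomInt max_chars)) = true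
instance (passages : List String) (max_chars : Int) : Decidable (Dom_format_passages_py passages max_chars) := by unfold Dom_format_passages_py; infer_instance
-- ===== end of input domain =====

-- B replaces A's running-total loop with break by a build-all-chunks / prefix-sums / cutoff decomposition (objective: alternative; same cost).

-- ===== PORT A =====
-- f"[{i}] {p}"
def pvChunkA (i : Int) (p : String) : String :=
  String.ofList ("[".toList ++ PySem.Int.toChars i ++ "] ".toList ++ p.toList)

-- the for-loop with running total and break
def pvALoop (max_chars : Int) : List (Int × String) → Int → List String → List String
  | [], _, out => out
  | ip :: rest, total, out =>
    let chunk := pvChunkA ip.1 ip.2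
    if total + PySem.Str.len chunk > max_chars then out
    else pvALoop max_chars rest (total + PySem.Str.len chunk) (out ++ [chunk])

def format_passages_py (passages : List String) (max_chars : Int) : String :=
  PySem.Str.join "\n" (pvALoop max_chars (PySem.List.enumerate passages 1) 0 [])

-- ===== PORT B =====
-- f"[{i}] {p}"
def pvChunkB (i : Int) (p : String) : String :=
  String.ofList ("[".toList ++ PySem.Int.toChars i ++ "] ".toList ++ p.toList)

-- itertools.accumulate of a list of ints
def pvAccumulate (acc : Int) : List Int → List Int
  | [] => []
  | x :: xs => (acc + x) :: pvAccumulate (acc + x) xs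

def format_passages_py_alt (passages : List String) (max_chars : Int) : String :=
  let chunks := (PySem.List.enumerate passages 1).map (fun ip => pvChunkB ip.1 ip.2)
  let sums := pvAccumulate 0 (chunks.map PySem.Str.len)
  let k := (sums.takeWhile (fun s => decide (s ≤ max_chars))).length
  PySem.Str.join "\n" (chunks.take k)

-- ===== PRECONDITION & SPEC =====
def Spec_format_passages_py (passages : List String) (max_chars : Int) (out : String) : Prop := out = format_passages_py_alt passages max_chars
instance (passages : List String) (max_chars : Int) (out : String) : Decidable (Spec_format_passages_py passages max_chars out) := by unfold Spec_format_passages_py; infer_instance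

-- ===== CLAIM (what is proved, stated in full; the proofs are below) =====
def Claim_equal_format_passages_py : Prop := ∀ (passages : List String) (max_chars : Int), Dom_format_passages_py passages max_chars → Spec_format_passages_py passages max_chars (format_passages_py passages max_chars)

-- ===== LEMMAS AND PROOFS =====

theorem pvChunk_eq : pvChunkA = pvChunkB := rfl

theorem pvALoop_eq (mc : Int) (l : List (Int × String)) (total : Int) (out : List String) :
    pvALoop mc l total out =
      out ++ (l.map (fun ip => pvChunkA ip.1 ip.2)).take
        ((pvAccumulate total ((l.map (fun ip => pvChunkA ip.1 ip.2)).map PySem.Str.len)).takeWhile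
          (fun s => decide (s ≤ mc))).length := by
  induction l generalizing total out with
  | nil => simp [pvALoop, pvAccumulate]
  | cons ip rest ih =>
    simp only [pvALoop, List.map_cons, pvAccumulate, List.takeWhile]
    split_ifs with h
    · have hd : (decide (total + PySem.Str.len (pvChunkA ip.1 ip.2) ≤ mc)) = false := by
        simp only [decide_eq_false_iff_not]; omega
      rw [hd]; simp
    · have hd : (decide (total + PySem.Str.len (pvChunkA ip.1 ip.2) ≤ mc)) = true := by
        simp only [decide_eq_true_eq]; omega
      rw [hd, ih]
      simp [List.take_succ_cons, List.map_map]

-- ===== VERDICT (by name: the statement is the Claim_ definition above) =====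
theorem format_passages_py_spec : Claim_equal_format_passages_py := by
  intro passages max_chars _
  unfold Spec_format_passages_py format_passages_py format_passages_py_alt
  rw [pvALoop_eq, ← pvChunk_eq]
  simp
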